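-- pv_equiv track=rewrite | github.com/theguyoverthere/CMU15-112-Spring17 | src/Week4/Lab/solvesCryptarithm.py | getNumericArgument
-- ===== SOURCE A (Python) =====
-- def getNumericArgument(arg, solution):
--     """ Return the numeric representation of the encoded string argument.
--
--     :param arg: A String representation of the one of the arguments of the
--                 addition problem.
--     :param solution: A single string where the index of the letter corresponds
--                    to the digit it represents. Thus, the string "OMY-ENDRS"
--                    represents the assignment:
--                    "O" - 0   "N" - 5
--                    "M" - 1   "D" - 6
--                    "Y" - 2   "R" - 7
--                    "E" - 4   "S" - 8
--     :return: A integral representation of the argument.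
--     """
--     result = []
--
--     for i in range(len(arg)):
--         index = solution.find(arg[i])
--         if index != -1:
--             result.append(str(index))
--
--     if "".join(result) == "":
--         return -1
--     else:
--         return int("".join(result) )
-- ===== SOURCE B (Python) =====
-- def getNumericArgument(arg, solution):
--     num = 0
--     found = False
--     for ch in arg:
--         index = solution.find(ch)
--         if index != -1:
--             found = True
--             shift = 10
--             while shift <= index:
--                 shift *= 10
--             num = num * shift + index
--     return num if found else -1
-- ===== Notes on version B (the rewrite author's own statement) =====
-- stated objective: alternative
-- what changed: B replaces A's pipeline of collecting str(index) digit strings, joining them and parsing with int() by direct Horner-style numeric accumulation (num = num*shift + index, shift the decimal width of index) with a found flag.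
import Mathlib
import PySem

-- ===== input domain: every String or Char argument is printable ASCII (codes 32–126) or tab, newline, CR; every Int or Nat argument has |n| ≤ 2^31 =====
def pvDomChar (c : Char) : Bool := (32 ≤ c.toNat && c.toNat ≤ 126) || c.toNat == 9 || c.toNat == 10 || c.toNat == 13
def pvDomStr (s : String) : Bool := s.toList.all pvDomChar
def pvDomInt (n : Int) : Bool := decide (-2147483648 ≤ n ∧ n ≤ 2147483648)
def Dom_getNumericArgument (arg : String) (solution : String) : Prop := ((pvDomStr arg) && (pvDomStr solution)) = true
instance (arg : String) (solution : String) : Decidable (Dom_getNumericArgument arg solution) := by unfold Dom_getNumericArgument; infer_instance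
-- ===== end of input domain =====

-- B replaces A's build-digit-strings / "".join / int() pipeline by direct Horner-style numeric
-- accumulation with a found flag (alternative decomposition; same return value everywhere).

-- ===== PORT A =====
-- hand port of Python's int(s) for the only strings A ever feeds it: nonempty sequences of
-- ASCII decimal digit characters (possibly with leading zeros); on exactly those strings
-- int() is base-10 evaluation of the digit values, which is what this fold computes.
def pvIntOfDigits (cs : List Char) : Int :=
  cs.foldl (fun a c => a * 10 + ((c.toNat : Int) - 48)) 0

def getNumericArgument (arg : String) (solution : String) : Int :=
  -- for i in range(len(arg)): index = solution.find(arg[i]); the index loop reads exactly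
  -- the characters of arg in order, ported as the fold over arg's characters
  let result : List (List Char) :=
    arg.toList.foldl (fun (result : List (List Char)) c =>
      let index := PySem.Chars.find solution.toList [c]
      if index ≠ -1 then result ++ [PySem.Int.toChars index] else result) []
  let joined := PySem.Chars.join [] result
  if joined = [] then -1 else pvIntOfDigits joined

-- ===== PORT B =====
-- while shift <= index: shift *= 10   (the '0 < shift' conjunct is a pure termination guard:
-- the loop is only entered with shift = 10, where it never changes the behaviour)
def pvShiftLoop (index : Int) (shift : Int) : Int :=
  if h : 0 < shift ∧ shift ≤ index then pvShiftLoop index (shift * 10) else shift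
termination_by (index + 1 - shift).toNat
decreasing_by
  have _h10 : shift + 1 ≤ shift * 10 := by nlinarith [h.1]
  omega

def getNumericArgument_alt (arg : String) (solution : String) : Int :=
  let st : Int × Bool :=
    arg.toList.foldl (fun (st : Int × Bool) c =>
      let index := PySem.Chars.find solution.toList [c]
      if index ≠ -1 then (st.1 * pvShiftLoop index 10 + index, true) else st) (0, false)
  if st.2 then st.1 else -1

-- ===== PRECONDITION & SPEC =====
def Spec_getNumericArgument (arg : String) (solution : String) (out : Int) : Prop := out = getNumericArgument_alt arg solution
instance (arg : String) (solution : String) (out : Int) : Decidable (Spec_getNumericArgument arg solution out) := by unfold Spec_getNumericArgument; infer_instance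

-- ===== CLAIM (what is proved, stated in full; the proofs are below) =====
def Claim_equal_getNumericArgument : Prop := ∀ (arg : String) (solution : String), Dom_getNumericArgument arg solution → Spec_getNumericArgument arg solution (getNumericArgument arg solution)

-- ===== LEMMAS AND PROOFS =====

theorem pvJoin_nil_eq_flatten (r : List (List Char)) : PySem.Chars.join [] r = r.flatten := by
  induction r with
  | nil => rfl
  | cons x t ih =>
    cases t with
    | nil => simp [PySem.Chars.join, List.intercalate]
    | cons y t' =>
      simp only [PySem.Chars.join, List.intercalate] at *
      simp [List.intersperse] at *
      simpa using ih

theorem pvIntOfDigits_acc (cs : List Char) (a : Int) :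
    cs.foldl (fun a c => a * 10 + ((c.toNat : Int) - 48)) a
      = a * 10 ^ cs.length + pvIntOfDigits cs := by
  induction cs generalizing a with
  | nil => simp [pvIntOfDigits]
  | cons c t ih =>
    simp only [List.foldl_cons, pvIntOfDigits] at *
    rw [ih, ih ((0:Int) * 10 + ((c.toNat : Int) - 48))]
    simp only [List.length_cons, pow_succ]
    push_cast
    ring

theorem pvIntOfDigits_append (xs ys : List Char) :
    pvIntOfDigits (xs ++ ys) = pvIntOfDigits xs * 10 ^ ys.length + pvIntOfDigits ys := by
  simp only [pvIntOfDigits, List.foldl_append]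
  rw [pvIntOfDigits_acc]
  rfl

theorem pvDigitChar_toNat (m : Nat) (h : m < 10) : (Nat.digitChar m).toNat = 48 + m := by
  interval_cases m <;> decide

theorem pvIntOfDigits_toDigits (n : Nat) : pvIntOfDigits (Nat.toDigits 10 n) = (n : Int) := by
  induction n using Nat.strong_induction_on with
  | _ n ih =>
    rw [Nat.toDigits_eq_if (by norm_num)]
    split
    · next h =>
      simp [pvIntOfDigits, pvDigitChar_toNat n h]
    · next h =>
      push Not at h
      rw [pvIntOfDigits_append, ih (n / 10) (by omega)]
      have h2 : n % 10 < 10 := Nat.mod_lt _ (by norm_num)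
      simp [pvIntOfDigits, pvDigitChar_toNat _ h2]
      omega

theorem pvToDigits_len_pos (n : Nat) : 0 < (Nat.toDigits 10 n).length := by
  rw [Nat.toDigits_eq_if (by norm_num)]
  split <;> simp

theorem pvToDigits_lt (n : Nat) : n < 10 ^ (Nat.toDigits 10 n).length := by
  induction n using Nat.strong_induction_on with
  | _ n ih =>
    rw [Nat.toDigits_eq_if (by norm_num)]
    split
    · next h => simpa using h
    · next h =>
      push Not at h
      have := ih (n / 10) (by omega)
      simp only [List.length_append, List.length_singleton, pow_succ]
      omega

theorem pvToDigits_le (n : Nat) (h : (Nat.toDigits 10 n).length ≠ 1) :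
    10 ^ ((Nat.toDigits 10 n).length - 1) ≤ n := by
  induction n using Nat.strong_induction_on with
  | _ n ih =>
    rw [Nat.toDigits_eq_if (by norm_num)] at h ⊢
    split at h
    · next hlt => rw [if_pos hlt]; simp at h
    · next hge =>
      push Not at hge
      rw [if_neg (by omega)]
      simp only [List.length_append, List.length_singleton] at *
      have hp := pvToDigits_len_pos (n / 10)
      by_cases h1 : (Nat.toDigits 10 (n / 10)).length = 1
      · rw [h1]
        simpa using hge
      · have := ih (n / 10) (by omega) (by omega)
        have h3 : 10 ^ ((Nat.toDigits 10 (n/10)).length - 1) * 10 ≤ (n/10) * 10 := by omega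
        rw [Nat.add_sub_cancel]
        calc 10 ^ (Nat.toDigits 10 (n/10)).length
            = 10 ^ ((Nat.toDigits 10 (n/10)).length - 1) * 10 := by
              rw [← pow_succ]; congr 1; omega
          _ ≤ (n/10) * 10 := h3
          _ ≤ n := by omega

theorem pvShiftLoop_gen (i : Int) (k : Nat) (hik : i < 10 ^ k) :
    ∀ m j : Nat, k - j = m → 1 ≤ j → j ≤ k → (j = k ∨ (10:Int) ^ (k-1) ≤ i) →
    pvShiftLoop i (10 ^ j) = 10 ^ k := by
  intro m
  induction m with
  | zero =>
    intro j hm hj hjk _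
    have : j = k := by omega
    subst this
    rw [pvShiftLoop]
    rw [dif_neg (by push Not; intro _; omega)]
  | succ m ih =>
    intro j hm hj hjk hlow
    have hjlt : j < k := by omega
    have hlow' : (10:Int) ^ (k-1) ≤ i := by
      rcases hlow with h | h
      · omega
      · exact h
    have hle : (10:Int) ^ j ≤ 10 ^ (k-1) := by
      apply pow_le_pow_right₀ (by norm_num)
      omega
    rw [pvShiftLoop]
    rw [dif_pos ⟨by positivity, le_trans hle hlow'⟩]
    have : (10:Int) ^ j * 10 = 10 ^ (j+1) := by rw [pow_succ]
    rw [this]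
    exact ih (j+1) (by omega) (by omega) (by omega) (by
      by_cases hc : j + 1 = k
      · exact Or.inl hc
      · exact Or.inr hlow')

theorem pvShiftLoop_eq_pow (n : Nat) : pvShiftLoop (n : Int) 10 = 10 ^ (Nat.toDigits 10 n).length := by
  have hk := pvToDigits_len_pos n
  have hlt : (n : Int) < 10 ^ (Nat.toDigits 10 n).length := by
    exact_mod_cast pvToDigits_lt n
  have h10 : (10:Int) = 10 ^ 1 := by norm_num
  rw [h10]
  apply pvShiftLoop_gen _ _ hlt ((Nat.toDigits 10 n).length - 1) _ rfl (by omega) (by omega)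
  by_cases hc : (Nat.toDigits 10 n).length = 1
  · exact Or.inl (by omega)
  · exact Or.inr (by exact_mod_cast pvToDigits_le n hc)

theorem pvLoop_rel (sol : List Char) (cs : List Char) : ∀ (r : List (List Char)),
    (∀ x ∈ r, x ≠ []) →
    (cs.foldl (fun (st : Int × Bool) c =>
        let index := PySem.Chars.find sol [c]
        if index ≠ -1 then (st.1 * pvShiftLoop index 10 + index, true) else st)
      (pvIntOfDigits r.flatten, decide (r ≠ [])))
      = (pvIntOfDigits (cs.foldl (fun (result : List (List Char)) c =>
            let index := PySem.Chars.find sol [c]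
            if index ≠ -1 then result ++ [PySem.Int.toChars index] else result) r).flatten,
         decide ((cs.foldl (fun (result : List (List Char)) c =>
            let index := PySem.Chars.find sol [c]
            if index ≠ -1 then result ++ [PySem.Int.toChars index] else result) r) ≠ []))
      ∧ (∀ x ∈ (cs.foldl (fun (result : List (List Char)) c =>
            let index := PySem.Chars.find sol [c]
            if index ≠ -1 then result ++ [PySem.Int.toChars index] else result) r), x ≠ []) := by
  induction cs with
  | nil => intro r hr; exact ⟨rfl, hr⟩
  | cons c cs ih =>
    intro r hr
    simp only [List.foldl_cons]
    by_cases hc : PySem.Chars.find sol [c] ≠ -1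
    · simp only [if_pos hc]
      have hge : 0 ≤ PySem.Chars.find sol [c] := by
        have := PySem.Chars.neg_one_le_find sol [c]
        omega
      set i := PySem.Chars.find sol [c] with hi
      obtain ⟨n, hn⟩ : ∃ n : Nat, i = (n : Int) := ⟨i.toNat, (Int.toNat_of_nonneg hge).symm⟩
      have hchunk : PySem.Int.toChars i = Nat.toDigits 10 n := by
        rw [PySem.Int.toChars, if_neg (by omega)]
        rw [hn]
        simp
      have hstate : (pvIntOfDigits r.flatten * pvShiftLoop i 10 + i, true)
          = (pvIntOfDigits (r ++ [PySem.Int.toChars i]).flatten,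
             decide ((r ++ [PySem.Int.toChars i]) ≠ [])) := by
        have hflat : (r ++ [PySem.Int.toChars i]).flatten = r.flatten ++ PySem.Int.toChars i := by
          simp
        refine Prod.ext ?_ ?_
        · rw [hflat, hchunk, pvIntOfDigits_append, pvIntOfDigits_toDigits, hn, pvShiftLoop_eq_pow]
        · simp
      rw [hstate]
      exact ih (r ++ [PySem.Int.toChars i]) (by
        intro x hx
        rcases List.mem_append.1 hx with h | h
        · exact hr x h
        · simp only [List.mem_singleton] at h
          subst h
          rw [hchunk]
          exact List.ne_nil_of_length_pos (pvToDigits_len_pos _))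
    · simp only [if_neg hc]
      exact ih r hr

theorem pvFinal (arg solution : String) :
    getNumericArgument arg solution = getNumericArgument_alt arg solution := by
  unfold getNumericArgument getNumericArgument_alt
  obtain ⟨h1, h2⟩ := pvLoop_rel solution.toList arg.toList [] (by intro x hx; simp at hx)
  simp only []
  rw [show ((0 : Int), false) = (pvIntOfDigits (([] : List (List Char)).flatten),
        decide (([] : List (List Char)) ≠ [])) from rfl, h1, pvJoin_nil_eq_flatten]
  set res := List.foldl (fun (result : List (List Char)) c =>
      let index := PySem.Chars.find solution.toList [c]
      if index ≠ -1 then result ++ [PySem.Int.toChars index] else result) [] arg.toList with hres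
  clear_value res
  by_cases hnil : res = []
  · subst hnil
    simp
  · have hflat : res.flatten ≠ [] := by
      cases res with
      | nil => exact absurd rfl hnil
      | cons y t =>
        have hy : y ≠ [] := h2 y (List.mem_cons_self)
        simp only [List.flatten_cons]
        intro hcontra
        exact hy (List.append_eq_nil_iff.1 hcontra).1
    simp [hnil, hflat]
-- ===== VERDICT (by name: the statement is the Claim_ definition above) =====
theorem getNumericArgument_spec : Claim_equal_getNumericArgument := by
  intro arg solution _
  unfold Spec_getNumericArgument
  exact pvFinal arg solution
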